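-- pv_equiv track=rewrite | github.com/naturals-blr/naturals-blr.github.io | build.py | format_text_professionally
-- ===== SOURCE A (Python) =====
-- def format_text_professionally(text):
--     """
--     Format text to be more professional and readable.
--     - Converts ALL CAPS to Title Case with proper grammar rules
--     - Keeps small words lowercase (except at start)
--     - Preserves acronyms and special terms
--     - Handles special characters properly
--     """
--     if not text or not isinstance(text, str):
--         return text
--
--     text = text.strip()
--
--     # If text is empty or just a dash, return as-is
--     if not text or text == "-":
--         return text
--
--     # If text is already in mixed case (not all caps), return as-is
--     if not text.isupper():
--         return text
--
--     # Words that should be lowercase in title case (unless at start)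
--     small_words = {
--         'a', 'an', 'and', 'as', 'at', 'but', 'by', 'for', 'in', 'of',
--         'on', 'or', 'the', 'to', 'up', 'via', 'with', 'from', 'into'
--     }
--
--     # Split by common delimiters but preserve them
--     words = []
--     current_word = []
--
--     for char in text:
--         if char in (' ', '/', '|', '(', ')', '-', '&', ',', '.', '+'):
--             if current_word:
--                 words.append(''.join(current_word))
--                 current_word = []
--             words.append(char)
--         else:
--             current_word.append(char)
--
--     if current_word:
--         words.append(''.join(current_word))
--
--     # Convert each word to title case with proper rules
--     formatted_words = []
--     word_index = 0  # Track actual word position (not delimiter position)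
--
--     for i, word in enumerate(words):
--         # If it's a delimiter, keep as-is
--         if word in (' ', '/', '|', '(', ')', '-', '&', ',', '.', '+'):
--             formatted_words.append(word)
--         else:
--             word_lower = word.lower()
--
--             # Always capitalize first word and words after opening parenthesis
--             is_first = word_index == 0
--             prev_is_open_paren = i > 0 and words[i-1] == '('
--
--             if is_first or prev_is_open_paren:
--                 formatted_words.append(word.capitalize())
--             elif word_lower in small_words:
--                 # Keep small words lowercase
--                 formatted_words.append(word_lower)
--             elif len(word) <= 2:
--                 # Keep very short words/acronyms uppercase (like "UV", "pH")
--                 formatted_words.append(word.upper())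
--             else:
--                 formatted_words.append(word.capitalize())
--
--             word_index += 1
--
--     return ''.join(formatted_words)
-- ===== SOURCE B (Python) =====
-- def format_text_professionally(text):
--     # Single-pass state machine: flush words at delimiters, carrying
--     # "seen a word yet" and the last delimiter as state (simpler, one pass).
--     if not text or not isinstance(text, str):
--         return text
--     text = text.strip()
--     if not text or text == "-" or not text.isupper():
--         return text
--
--     small_words = {
--         'a', 'an', 'and', 'as', 'at', 'but', 'by', 'for', 'in', 'of',
--         'on', 'or', 'the', 'to', 'up', 'via', 'with', 'from', 'into'
--     }
--     delims = {' ', '/', '|', '(', ')', '-', '&', ',', '.', '+'}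
--
--     def fmt(word, seen_word, last_delim):
--         if not seen_word or last_delim == '(':
--             return word.capitalize()
--         lw = word.lower()
--         if lw in small_words:
--             return lw
--         if len(word) <= 2:
--             return word.upper()
--         return word.capitalize()
--
--     out = []
--     buf = []
--     seen_word = False
--     last_delim = ''
--     for ch in text:
--         if ch in delims:
--             if buf:
--                 out.append(fmt(''.join(buf), seen_word, last_delim))
--                 seen_word = True
--                 buf = []
--             out.append(ch)
--             last_delim = ch
--         else:
--             buf.append(ch)
--     if buf:
--         out.append(fmt(''.join(buf), seen_word, last_delim))
--     return ''.join(out)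
-- ===== Notes on version B (the rewrite author's own statement) =====
-- stated objective: simpler
-- what changed: Replaces A's tokenize-into-a-words-list pass followed by an enumerate/index-lookup formatting pass with a single pass over the characters that flushes and formats each word on the fly, carrying seen-a-word and last-delimiter as state (no token list, no words[i-1] indexing).
import Mathlib
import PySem

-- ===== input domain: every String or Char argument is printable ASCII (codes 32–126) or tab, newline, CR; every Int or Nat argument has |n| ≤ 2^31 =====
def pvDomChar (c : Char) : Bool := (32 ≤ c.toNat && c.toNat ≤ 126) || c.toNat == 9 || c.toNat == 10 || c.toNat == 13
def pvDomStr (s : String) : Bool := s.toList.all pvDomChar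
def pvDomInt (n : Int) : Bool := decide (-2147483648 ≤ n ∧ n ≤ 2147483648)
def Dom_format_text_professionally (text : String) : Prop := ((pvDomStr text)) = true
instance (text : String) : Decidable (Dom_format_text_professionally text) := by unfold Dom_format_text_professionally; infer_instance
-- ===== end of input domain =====

-- B rewrites A's tokenize-then-format two passes as one single-pass state machine
-- over the characters (objective: simpler, one traversal instead of two).

-- shared vocabulary of both programs (the delimiter tuple, the small-word set,
-- ASCII-exact str.isupper / str.capitalize):
def pvDelims : List Char := [' ', '/', '|', '(', ')', '-', '&', ',', '.', '+']

def pvSmall : List (List Char) :=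
  [['a'], ['a','n'], ['a','n','d'], ['a','s'], ['a','t'], ['b','u','t'], ['b','y'],
   ['f','o','r'], ['i','n'], ['o','f'], ['o','n'], ['o','r'], ['t','h','e'], ['t','o'],
   ['u','p'], ['v','i','a'], ['w','i','t','h'], ['f','r','o','m'], ['i','n','t','o']]

-- s.isupper(): at least one cased char, all cased chars uppercase (exact on ASCII,
-- where the cased chars are exactly the letters)
def pvIsUpper (cs : List Char) : Bool :=
  cs.any PySem.Chars.isalpha && cs.all (fun c => !PySem.Chars.isalpha c || PySem.Chars.isupper c)

-- s.capitalize() (exact on ASCII)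
def pvCap (cs : List Char) : List Char :=
  match cs with
  | [] => []
  | c :: rest => PySem.Chars.upperChar c :: rest.map PySem.Chars.lowerChar

-- ===== PORT A =====
-- A's first pass: split into words/delimiter tokens, preserving delimiters
def pvTokStep (st : List (List Char) × List Char) (c : Char) : List (List Char) × List Char :=
  if c ∈ pvDelims then ((if st.2 ≠ [] then st.1 ++ [st.2] else st.1) ++ [[c]], [])
  else (st.1, st.2 ++ [c])

-- A's second pass body: for i, word in enumerate(words), state = (formatted_words, word_index)
def pvFmtA (words : List (List Char)) (st : List (List Char) × Nat) (iw : Int × List Char) :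
    List (List Char) × Nat :=
  if iw.2 ∈ pvDelims.map (fun c => [c]) then (st.1 ++ [iw.2], st.2)
  else
    let wl := iw.2.map PySem.Chars.lowerChar
    let f :=
      if st.2 = 0 ∨ (0 < iw.1 ∧ PySem.List.pyGet? words (iw.1 - 1) = some ['(']) then pvCap iw.2
      else if wl ∈ pvSmall then wl
      else if iw.2.length ≤ 2 then iw.2.map PySem.Chars.upperChar
      else pvCap iw.2
    (st.1 ++ [f], st.2 + 1)

def format_text_professionally (text : String) : String :=
  if text = "" then text
  else
    let t := (PySem.Str.strip text).toList
    if t = [] then String.mk t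
    else if t = ['-'] then String.mk t
    else if pvIsUpper t = false then String.mk t
    else
      let p := t.foldl pvTokStep ([], [])
      let words := if p.2 ≠ [] then p.1 ++ [p.2] else p.1
      let r := (PySem.List.enumerate words).foldl (pvFmtA words) ([], 0)
      String.mk r.1.flatten

-- ===== PORT B =====
-- B's word formatter: context = (seen a word before?, last delimiter seen)
def pvFmtB (word : List Char) (seen : Bool) (ld : List Char) : List Char :=
  if seen = false ∨ ld = ['('] then pvCap word
  else
    let lw := word.map PySem.Chars.lowerChar
    if lw ∈ pvSmall then lw
    else if word.length ≤ 2 then word.map PySem.Chars.upperChar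
    else pvCap word

-- B's single pass: state = (out, buf, seen_word, last_delim)
def pvStepB (st : List (List Char) × List Char × Bool × List Char) (c : Char) :
    List (List Char) × List Char × Bool × List Char :=
  if c ∈ pvDelims then
    if st.2.1 ≠ [] then (st.1 ++ [pvFmtB st.2.1 st.2.2.1 st.2.2.2, [c]], [], true, [c])
    else (st.1 ++ [[c]], [], st.2.2.1, [c])
  else (st.1, st.2.1 ++ [c], st.2.2.1, st.2.2.2)

def format_text_professionally_alt (text : String) : String :=
  if text = "" then text
  else
    let t := (PySem.Str.strip text).toList
    if t = [] ∨ t = ['-'] ∨ pvIsUpper t = false then String.mk t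
    else
      let st := t.foldl pvStepB ([], [], false, [])
      let out := if st.2.1 ≠ [] then st.1 ++ [pvFmtB st.2.1 st.2.2.1 st.2.2.2] else st.1
      String.mk out.flatten

-- ===== PRECONDITION & SPEC =====
def Spec_format_text_professionally (text : String) (out : String) : Prop := out = format_text_professionally_alt text
instance (text : String) (out : String) : Decidable (Spec_format_text_professionally text out) := by unfold Spec_format_text_professionally; infer_instance

-- ===== CLAIM (what is proved, stated in full; the proofs are below) =====
def Claim_equal_format_text_professionally : Prop := ∀ (text : String), Dom_format_text_professionally text → Spec_format_text_professionally text (format_text_professionally text)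

-- ===== LEMMAS AND PROOFS =====

-- recursive form of A's tokenizer
def tokRec : List Char → List Char → List (List Char)
  | [], cur => if cur ≠ [] then [cur] else []
  | c :: cs, cur =>
    if c ∈ pvDelims then (if cur ≠ [] then [cur] else []) ++ [c] :: tokRec cs []
    else tokRec cs (cur ++ [c])

lemma tok_foldl (cs : List Char) : ∀ (ws : List (List Char)) (cur : List Char),
    (let p := cs.foldl pvTokStep (ws, cur);
     if p.2 ≠ [] then p.1 ++ [p.2] else p.1) = ws ++ tokRec cs cur := by
  induction cs with
  | nil => intro ws cur; simp [tokRec]; split <;> simp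
  | cons c cs ih =>
    intro ws cur
    simp only [List.foldl_cons, tokRec, pvTokStep]
    by_cases hc : c ∈ pvDelims
    · simp only [hc, if_pos]
      rw [ih]
      by_cases hcur : cur ≠ [] <;> simp [hcur]
    · simp only [hc, if_neg, if_false]
      rw [ih]

-- A's second pass, rephrased as a recursion carrying (was prev token '('?, seen a word?)
def fmtSeq : List (List Char) → Bool → Bool → List (List Char)
  | [], _, _ => []
  | w :: ws, paren, seen =>
    if w ∈ pvDelims.map (fun c => [c]) then w :: fmtSeq ws (decide (w = ['('])) seen
    else pvFmtBcore w seen paren :: fmtSeq ws (decide (w = ['('])) true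
where pvFmtBcore (w : List Char) (seen paren : Bool) : List Char :=
  if seen = false ∨ paren = true then pvCap w
  else if w.map PySem.Chars.lowerChar ∈ pvSmall then w.map PySem.Chars.lowerChar
  else if w.length ≤ 2 then w.map PySem.Chars.upperChar
  else pvCap w

lemma pyGet?_snoc_pred (pre : List (List Char)) (w : List Char) (ws : List (List Char))
    (h : pre ≠ []) :
    PySem.List.pyGet? (pre ++ w :: ws) ((pre.length : Int) - 1) = pre.getLast? := by
  have hlen : 0 < pre.length := List.length_pos_of_ne_nil h
  have : ((pre.length : Int) - 1) = ((pre.length - 1 : Nat) : Int) := by omega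
  rw [this, PySem.List.pyGet?_natCast]
  have hlt : pre.length - 1 < (pre ++ w :: ws).length := by simp; omega
  rw [List.getElem?_eq_getElem hlt]
  rw [List.getElem_append_left (by omega)]
  rw [List.getLast?_eq_getElem? ]
  rw [List.getElem?_eq_getElem (by omega)]

lemma pass2_eq (ws : List (List Char)) : ∀ (pre : List (List Char)) (acc : List (List Char)) (wi : Nat),
    ((PySem.List.enumerate ws (pre.length : Int)).foldl (pvFmtA (pre ++ ws)) (acc, wi)).1
      = acc ++ fmtSeq ws (decide (pre.getLast? = some ['('])) (decide (wi ≠ 0)) := by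
  induction ws with
  | nil => intro pre acc wi; simp [PySem.List.enumerate_nil, fmtSeq]
  | cons w ws ih =>
    intro pre acc wi
    rw [PySem.List.enumerate_cons, List.foldl_cons]
    have hcast : (pre.length : Int) + 1 = ((pre ++ [w]).length : Int) := by
      simp
    have hrw : pre ++ w :: ws = (pre ++ [w]) ++ ws := by simp
    by_cases hw : w ∈ pvDelims.map (fun c => [c])
    · -- delimiter token: appended as-is, word_index unchanged
      have hstep : pvFmtA (pre ++ w :: ws) (acc, wi) ((pre.length : Int), w)
          = (acc ++ [w], wi) := by
        simp [pvFmtA, hw]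
      rw [hstep, hcast, hrw, ih]
      have hlast : (pre ++ [w]).getLast? = some w := by
        simp [List.getLast?_concat]
      simp only [fmtSeq, hw, if_pos, hlast]
      simp
    · -- word token
      have hparen : (0 < (pre.length : Int) ∧
            PySem.List.pyGet? (pre ++ w :: ws) ((pre.length : Int) - 1) = some ['('])
          ↔ pre.getLast? = some ['('] := by
        rcases eq_or_ne pre [] with h | h
        · subst h; simp
        · rw [pyGet?_snoc_pred pre w ws h]
          have hpos : 0 < (pre.length : Int) := by
            have := List.length_pos_of_ne_nil h; omega
          exact and_iff_right hpos
      have hstep : pvFmtA (pre ++ w :: ws) (acc, wi) ((pre.length : Int), w)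
          = (acc ++ [fmtSeq.pvFmtBcore w (decide (wi ≠ 0)) (decide (pre.getLast? = some ['(']))], wi + 1) := by
        simp only [pvFmtA, hw, if_false, fmtSeq.pvFmtBcore, hparen]
        by_cases h0 : wi = 0 <;> by_cases hp : pre.getLast? = some ['('] <;>
          simp [h0, hp]
      rw [hstep, hcast, hrw, ih]
      have hwp : (decide (w = ['('])) = false := by
        have : ['('] ∈ pvDelims.map (fun c => [c]) := by simp [pvDelims]
        simp; intro h; rw [h] at hw; exact hw this
      simp only [fmtSeq, hw, if_false, hwp]
      simp [List.getLast?_concat, hwp]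

-- recursive form of B's single pass
def bRec : List Char → List Char → Bool → List Char → List (List Char)
  | [], buf, seen, ld => if buf ≠ [] then [pvFmtB buf seen ld] else []
  | c :: cs, buf, seen, ld =>
    if c ∈ pvDelims then
      (if buf ≠ [] then [pvFmtB buf seen ld] else []) ++ [c] :: bRec cs [] (seen || decide (buf ≠ [])) [c]
    else bRec cs (buf ++ [c]) seen ld

lemma b_foldl (cs : List Char) : ∀ (out : List (List Char)) (buf : List Char) (seen : Bool) (ld : List Char),
    (let st := cs.foldl pvStepB (out, buf, seen, ld);
     if st.2.1 ≠ [] then st.1 ++ [pvFmtB st.2.1 st.2.2.1 st.2.2.2] else st.1)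
      = out ++ bRec cs buf seen ld := by
  induction cs with
  | nil => intro out buf seen ld; simp [bRec]; split <;> simp
  | cons c cs ih =>
    intro out buf seen ld
    simp only [List.foldl_cons, bRec, pvStepB]
    by_cases hc : c ∈ pvDelims
    · simp only [hc, if_pos]
      by_cases hbuf : buf ≠ []
      · simp only [hbuf, if_pos, ne_eq, not_false_eq_true, decide_true, Bool.or_true]
        rw [ih]; simp [hbuf]
      · simp only [hbuf, if_neg, if_false]
        have : buf = [] := by simpa using hbuf
        subst this
        rw [ih]; simp
    · simp only [hc, if_neg, if_false]
      rw [ih]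

-- pvFmtB is fmtSeq's word formatter with the paren context decided from last_delim
lemma pvFmtB_eq (w : List Char) (seen : Bool) (ld : List Char) :
    pvFmtB w seen ld = fmtSeq.pvFmtBcore w seen (decide (ld = ['('])) := by
  by_cases hld : ld = ['('] <;> by_cases hs : seen = false <;>
    simp [pvFmtB, fmtSeq.pvFmtBcore, hld, hs]

-- the bridge: formatting A's token stream = B's fused pass
lemma bridge (cs : List Char) : ∀ (cur : List Char) (seen : Bool) (ld : List Char),
    (∀ ch ∈ cur, ch ∉ pvDelims) →
    fmtSeq (tokRec cs cur) (decide (ld = ['('])) seen = bRec cs cur seen ld := by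
  induction cs with
  | nil =>
    intro cur seen ld hcur
    by_cases hc : cur ≠ []
    · have hnw : cur ∉ pvDelims.map (fun c => [c]) := by
        intro hmem
        rcases List.mem_map.mp hmem with ⟨d, hd, hdc⟩
        subst hdc
        exact hcur d (by simp) hd
      simp [tokRec, bRec, hc, fmtSeq, hnw, pvFmtB_eq]
    · have hc' : cur = [] := not_ne_iff.mp hc
      subst hc'
      simp [tokRec, bRec, fmtSeq]
  | cons c cs ih =>
    intro cur seen ld hcur
    simp only [tokRec, bRec]
    by_cases hc : c ∈ pvDelims
    · simp only [hc, if_pos]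
      have hdelim : [c] ∈ pvDelims.map (fun cc => [cc]) := List.mem_map.mpr ⟨c, hc, rfl⟩
      by_cases hb : cur ≠ []
      · have hnw : cur ∉ pvDelims.map (fun cc => [cc]) := by
          intro hmem
          rcases List.mem_map.mp hmem with ⟨d, hd, hdc⟩
          subst hdc
          exact hcur d (by simp) hd
        rw [if_pos hb]
        simp only [List.cons_append, List.nil_append]
        simp only [fmtSeq, hnw, if_false, hdelim, if_pos, hb, decide_true, Bool.or_true]
        rw [ih [] true [c] (by simp)]
        simp [hb, pvFmtB_eq]
      · have hb' : cur = [] := not_ne_iff.mp hb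
        subst hb'
        simp only [if_false, List.nil_append, ne_eq, not_true_eq_false, decide_false,
          Bool.or_false]
        simp only [fmtSeq, hdelim, if_pos]
        rw [ih [] seen [c] (by simp)]
    · simp only [hc, if_neg, if_false]
      apply ih
      intro ch hch
      rcases List.mem_append.mp hch with h | h
      · exact hcur ch h
      · simp at h; subst h; exact hc

-- ===== VERDICT (by name: the statement is the Claim_ definition above) =====
set_option maxHeartbeats 1000000 in
theorem format_text_professionally_spec : Claim_equal_format_text_professionally := by
  intro text _
  unfold Spec_format_text_professionally format_text_professionally format_text_professionally_alt
  by_cases h0 : text = ""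
  · simp [h0]
  · simp only [h0, if_neg, if_false]
    set t := (PySem.Str.strip text).toList with ht
    by_cases h1 : t = []
    · simp [h1]
    · by_cases h2 : t = ['-']
      · simp [h1, h2]
      · by_cases h3 : pvIsUpper t = false
        · simp [h1, h2, h3]
        · simp only [h1, h2, h3, if_false, false_or, or_false, Bool.true_eq_false]
          -- A's core = B's core
          have hA : (if (t.foldl pvTokStep ([], [])).2 ≠ []
                then (t.foldl pvTokStep ([], [])).1 ++ [(t.foldl pvTokStep ([], [])).2]
                else (t.foldl pvTokStep ([], [])).1) = tokRec t [] := by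
            simpa using tok_foldl t [] []
          rw [hA]
          have hA2 := pass2_eq (tokRec t []) [] [] 0
          simp only [List.length_nil, Nat.cast_zero, List.nil_append, List.getLast?_nil,
            ne_eq, not_true_eq_false, decide_false] at hA2
          rw [hA2]
          have hB : (if (t.foldl pvStepB ([], [], false, [])).2.1 ≠ []
                then (t.foldl pvStepB ([], [], false, [])).1
                  ++ [pvFmtB (t.foldl pvStepB ([], [], false, [])).2.1
                        (t.foldl pvStepB ([], [], false, [])).2.2.1
                        (t.foldl pvStepB ([], [], false, [])).2.2.2]
                else (t.foldl pvStepB ([], [], false, [])).1) = bRec t [] false [] := by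
            simpa using b_foldl t [] [] false []
          rw [hB]
          have hbr := bridge t [] false [] (by simp)
          simp only [decide_false, List.nil_eq, reduceCtorEq, decide_eq_false_iff_not] at hbr
          simp [hbr]
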